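-- pv_equiv track=rewrite | github.com/Sankalp7860/AI | Assign02/ques06.py | transpose_and_flatten
-- ===== SOURCE A (Python) =====
-- def transpose_and_flatten(matrix):
--     t_matrix = []
--     for i in range(len(matrix[0])):
--         row = []
--         for j in range(len(matrix)):
--             row.append(matrix[j][i])
--         t_matrix.append(row)
--
--     f_matrix = []
--     for row in t_matrix:
--         for element in row:
--             f_matrix.append(element)
--
--     return t_matrix, f_matrix
-- ===== SOURCE B (Python) =====
-- def transpose_and_flatten(matrix):
--     nrows = len(matrix)
--     ncols = len(matrix[0])
--     f_matrix = []
--     for i in range(ncols):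
--         for j in range(nrows):
--             f_matrix.append(matrix[j][i])
--     t_matrix = [f_matrix[k * nrows:(k + 1) * nrows] for k in range(ncols)]
--     return t_matrix, f_matrix
-- ===== Notes on version B (the rewrite author's own statement) =====
-- stated objective: alternative
-- what changed: B inverts the data dependency: it builds the flat list first with a single double loop and then reconstructs the transposed matrix by slicing the flat list into ncols chunks of length nrows, instead of building the transposed matrix row by row and flattening it afterwards.
import Mathlib
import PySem

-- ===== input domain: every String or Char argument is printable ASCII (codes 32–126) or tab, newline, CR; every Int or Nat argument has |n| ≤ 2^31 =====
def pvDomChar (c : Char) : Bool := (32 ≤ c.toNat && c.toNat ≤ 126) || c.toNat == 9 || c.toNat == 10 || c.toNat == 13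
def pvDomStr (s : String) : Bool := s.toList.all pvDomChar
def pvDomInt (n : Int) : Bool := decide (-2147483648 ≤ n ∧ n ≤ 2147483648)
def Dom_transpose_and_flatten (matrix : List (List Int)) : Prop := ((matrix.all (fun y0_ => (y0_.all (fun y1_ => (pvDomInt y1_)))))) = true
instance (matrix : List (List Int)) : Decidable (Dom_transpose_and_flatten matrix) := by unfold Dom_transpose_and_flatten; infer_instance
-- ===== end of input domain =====

-- B builds the flat list first and reconstructs the transposed matrix by slicing it into chunks (alternative decomposition, same asymptotic cost).


-- ===== PORT A =====
def transpose_and_flatten (matrix : List (List Int)) : List (List Int) × List Int :=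
  let t_matrix := (PySem.List.pyRange 0 ((PySem.List.pyGetD matrix 0 []).length : Int) 1).foldl
    (fun t i =>
      let row := (PySem.List.pyRange 0 (matrix.length : Int) 1).foldl
        (fun row j => row ++ [PySem.List.pyGetD (PySem.List.pyGetD matrix j []) i 0]) []
      t ++ [row]) []
  let f_matrix := t_matrix.foldl (fun f row => row.foldl (fun f e => f ++ [e]) f) []
  (t_matrix, f_matrix)

-- ===== PORT B =====
def transpose_and_flatten_alt (matrix : List (List Int)) : List (List Int) × List Int :=
  let nrows : Int := matrix.length
  let ncols : Int := (PySem.List.pyGetD matrix 0 []).length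
  let f_matrix := (PySem.List.pyRange 0 ncols 1).foldl
    (fun f i => (PySem.List.pyRange 0 nrows 1).foldl
      (fun f j => f ++ [PySem.List.pyGetD (PySem.List.pyGetD matrix j []) i 0]) f) []
  let t_matrix := (PySem.List.pyRange 0 ncols 1).map
    (fun k => PySem.List.slice f_matrix (some (k * nrows)) (some ((k + 1) * nrows)))
  (t_matrix, f_matrix)

-- ===== PRECONDITION & SPEC =====
-- Pre_ excludes exactly the inputs where Python A raises IndexError: the empty matrix
-- (matrix[0]) and matrices with a row shorter than row 0 (matrix[j][i]).
def Pre_transpose_and_flatten (matrix : List (List Int)) : Prop :=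
  matrix ≠ [] ∧ ∀ row ∈ matrix, (matrix.headD []).length ≤ row.length
instance (matrix : List (List Int)) : Decidable (Pre_transpose_and_flatten matrix) := by
  unfold Pre_transpose_and_flatten; infer_instance
def pvWitness_transpose_and_flatten : List (List Int) := [[1, 2, 3], [4, 5, 6]]
def Spec_transpose_and_flatten (matrix : List (List Int)) (out : List (List Int) × List Int) : Prop := out = transpose_and_flatten_alt matrix
instance (matrix : List (List Int)) (out : List (List Int) × List Int) : Decidable (Spec_transpose_and_flatten matrix out) := by unfold Spec_transpose_and_flatten; infer_instance

-- ===== CLAIM (what is proved, stated in full; the proofs are below) =====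
def Claim_equal_transpose_and_flatten : Prop := ∀ (matrix : List (List Int)), Dom_transpose_and_flatten matrix → Pre_transpose_and_flatten matrix → Spec_transpose_and_flatten matrix (transpose_and_flatten matrix)

-- ===== LEMMAS AND PROOFS =====

-- accumulate-append fold is init ++ list (specific shape of A's flatten loop)
theorem pv_foldl_append_sing (l : List Int) (init : List Int) :
    l.foldl (fun f e => f ++ [e]) init = init ++ l := by
  induction l generalizing init with
  | nil => simp
  | cons x xs ih => rw [List.foldl_cons, ih]; simp

theorem pv_foldl_flatten (t : List (List Int)) (init : List Int) :
    t.foldl (fun f row => row.foldl (fun f e => f ++ [e]) f) init = init ++ t.flatten := by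
  induction t generalizing init with
  | nil => simp
  | cons r rs ih => rw [List.foldl_cons, pv_foldl_append_sing, ih]; simp

theorem pv_foldl_append_map {α β : Type} (l : List α) (f : α → β) (init : List β) :
    l.foldl (fun acc x => acc ++ [f x]) init = init ++ l.map f := by
  induction l generalizing init with
  | nil => simp
  | cons x xs ih => rw [List.foldl_cons, ih]; simp

theorem pv_foldl_flatMap {α β : Type} (l : List α) (g : α → List β) (init : List β) :
    l.foldl (fun acc x => acc ++ g x) init = init ++ l.flatMap g := by
  induction l generalizing init with
  | nil => simp
  | cons x xs ih => rw [List.foldl_cons, ih]; simp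

-- slicing the flattening of equal-length rows recovers row k
theorem pv_chunk (rows : List (List Int)) (L k : Nat)
    (h : ∀ r ∈ rows, r.length = L) (hk : k < rows.length) :
    (rows.flatten.drop (k * L)).take L = rows[k] := by
  induction rows generalizing k with
  | nil => simp at hk
  | cons r rs ih =>
    have hr : r.length = L := h r (by simp)
    cases k with
    | zero =>
      simp [List.flatten, List.take_append_of_le_length (by omega : L ≤ r.length), hr]
    | succ k =>
      have hdrop : (r ++ rs.flatten).drop ((k + 1) * L) = rs.flatten.drop (k * L) := by
        have he : (k + 1) * L = r.length + k * L := by rw [hr]; ring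
        rw [he, List.drop_length_add_append]
      simpa [List.flatten, hdrop] using
        ih k (fun x hx => h x (by simp [hx])) (by simpa using hk)

theorem transpose_and_flatten_eq_alt (matrix : List (List Int)) :
    transpose_and_flatten matrix = transpose_and_flatten_alt matrix := by
  unfold transpose_and_flatten transpose_and_flatten_alt
  simp only [Prod.mk.injEq]
  set n : Nat := matrix.length with hn
  set c : Nat := (PySem.List.pyGetD matrix 0 []).length with hc
  set g : Int → Int → Int :=
    fun i j => PySem.List.pyGetD (PySem.List.pyGetD matrix j []) i 0 with hg
  -- row built by A's inner loop, as a map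
  have hrow : ∀ i : Int,
      (PySem.List.pyRange 0 (n : Int) 1).foldl (fun row j => row ++ [g i j]) [] =
      (PySem.List.pyRange 0 (n : Int) 1).map (g i) := by
    intro i; simpa using pv_foldl_append_map (PySem.List.pyRange 0 (n : Int) 1) (g i) []
  -- A's transposed matrix as a map of maps
  have ht : (PySem.List.pyRange 0 (c : Int) 1).foldl
      (fun t i => t ++ [(PySem.List.pyRange 0 (n : Int) 1).foldl (fun row j => row ++ [g i j]) []]) [] =
      (PySem.List.pyRange 0 (c : Int) 1).map (fun i => (PySem.List.pyRange 0 (n : Int) 1).map (g i)) := by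
    have h0 := pv_foldl_append_map (PySem.List.pyRange 0 (c : Int) 1)
      (fun i => (PySem.List.pyRange 0 (n : Int) 1).foldl (fun row j => row ++ [g i j]) []) []
    simpa [hrow] using h0
  set rows : List (List Int) :=
    (PySem.List.pyRange 0 (c : Int) 1).map (fun i => (PySem.List.pyRange 0 (n : Int) 1).map (g i)) with hrows
  -- B's flat list equals the flattening of A's rows
  have hf : (PySem.List.pyRange 0 (c : Int) 1).foldl
      (fun f i => (PySem.List.pyRange 0 (n : Int) 1).foldl (fun f j => f ++ [g i j]) f) [] =
      rows.flatten := by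
    have hstep : ∀ (f : List Int), ∀ i ∈ PySem.List.pyRange 0 (c : Int) 1,
        (PySem.List.pyRange 0 (n : Int) 1).foldl (fun f j => f ++ [g i j]) f =
        f ++ (PySem.List.pyRange 0 (n : Int) 1).map (g i) :=
      fun f i _ => pv_foldl_append_map (PySem.List.pyRange 0 (n : Int) 1) (g i) f
    calc (PySem.List.pyRange 0 (c : Int) 1).foldl
          (fun f i => (PySem.List.pyRange 0 (n : Int) 1).foldl (fun f j => f ++ [g i j]) f) []
        = (PySem.List.pyRange 0 (c : Int) 1).foldl
          (fun f i => f ++ (PySem.List.pyRange 0 (n : Int) 1).map (g i)) [] :=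
          PySem.List.foldl_congr_mem _ _ _ _ hstep
      _ = (PySem.List.pyRange 0 (c : Int) 1).flatMap
            (fun i => (PySem.List.pyRange 0 (n : Int) 1).map (g i)) := by
          simpa using pv_foldl_flatMap (PySem.List.pyRange 0 (c : Int) 1)
            (fun i => (PySem.List.pyRange 0 (n : Int) 1).map (g i)) []
      _ = rows.flatten := by rw [hrows, List.flatMap_def]
  -- lengths of the rows
  have hlen : ∀ r ∈ rows, r.length = n := by
    intro r hr
    rcases List.mem_map.mp hr with ⟨i, _, rfl⟩
    simp [PySem.List.length_pyRange_one]
  have hrowslen : rows.length = c := by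
    rw [hrows]; simp [PySem.List.length_pyRange_one]
  -- B's reconstructed matrix equals A's rows
  have hslices : (PySem.List.pyRange 0 (c : Int) 1).map
      (fun k => PySem.List.slice rows.flatten (some (k * (n : Int))) (some ((k + 1) * (n : Int)))) = rows := by
    have key : ∀ k ∈ PySem.List.pyRange 0 (c : Int) 1,
        PySem.List.slice rows.flatten (some (k * (n : Int))) (some ((k + 1) * (n : Int))) =
        (fun i => (PySem.List.pyRange 0 (n : Int) 1).map (g i)) k := by
      intro k hk
      have hk' := (PySem.List.mem_pyRange_one).mp hk
      have hk0 : (0:Int) ≤ k := hk'.1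
      have hkc : k < (c : Int) := hk'.2
      have ha : (0:Int) ≤ k * (n : Int) := by positivity
      have hb : (0:Int) ≤ (k + 1) * (n : Int) := by positivity
      rw [PySem.List.slice_toNat _ ha hb]
      have h1 : (k * (n : Int)).toNat = k.toNat * n := by
        rw [show k * (n : Int) = ((k.toNat * n : Nat) : Int) by push_cast [Int.toNat_of_nonneg hk0]; ring]
        exact Int.toNat_natCast _
      have h2 : ((k + 1) * (n : Int)).toNat = (k.toNat + 1) * n := by
        rw [show (k + 1) * (n : Int) = (((k.toNat + 1) * n : Nat) : Int) by push_cast [Int.toNat_of_nonneg hk0]; ring]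
        exact Int.toNat_natCast _
      rw [h1, h2]
      have htake : (k.toNat + 1) * n - k.toNat * n = n := by ring_nf; omega
      rw [htake]
      have hkidx : k.toNat < rows.length := by
        rw [hrowslen]; omega
      rw [pv_chunk rows n k.toNat hlen hkidx]
      simp [hrows, List.getElem_map, PySem.List.getElem_pyRange_one, Int.toNat_of_nonneg hk0]
    calc (PySem.List.pyRange 0 (c : Int) 1).map
          (fun k => PySem.List.slice rows.flatten (some (k * (n : Int))) (some ((k + 1) * (n : Int))))
        = (PySem.List.pyRange 0 (c : Int) 1).map (fun i => (PySem.List.pyRange 0 (n : Int) 1).map (g i)) :=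
          List.map_congr_left key
      _ = rows := hrows.symm
  refine ⟨?_, ?_⟩
  · rw [ht]
    rw [hf]
    exact hslices.symm
  · rw [ht, pv_foldl_flatten, hf]
    exact List.nil_append _

-- ===== VERDICT (by name: the statement is the Claim_ definition above) =====
theorem transpose_and_flatten_spec : Claim_equal_transpose_and_flatten := by
  intro matrix _ _
  unfold Spec_transpose_and_flatten
  exact transpose_and_flatten_eq_alt matrix
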